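-- pv_equiv track=rewrite | github.com/valleyceo/code_journal | 1. Problems/m. Math/0. Template/a. Operator - Factorial.py | modFact
-- ===== SOURCE A (Python) =====
-- def largestPower(n, p):
--     x = 0
--
--     # Calculate x = n/p + n/(p^2) + n/(p^3) + ....
--     while (n):
--         n //= p
--         x += n
--
--     return x
--
-- def power( x, y, p):
--     res = 1 # Initialize result
--     x = x % p # Update x if it is more than
--               # or equal to p
--     while (y > 0) :
--
--         # If y is odd, multiply x with result
--         if (y & 1) :
--             res = (res * x) % p
--
--         # y must be even now
--         y = y >> 1 # y = y/2
--         x = (x * x) % p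
--
--     return res
--
-- def modFact( n, p) :
--
--     if (n >= p) :
--         return 0
--
--     res = 1
--     isPrime = [1] * (n + 1)
--     i = 2
--
--     while(i * i <= n):
--         if (isPrime[i]):
--             for j in range(2 * i, n, i) :
--                 isPrime[j] = 0
--         i += 1
--
--     for i in range(2, n):
--         if (isPrime[i]) :
--
--             # Find the largest power of prime 'i'
--             # that divides n
--             k = largestPower(n, i)
--
--             # Multiply result with (i^k) % p
--             res = (res * power(i, k, p)) % p
--
--     return res
-- ===== SOURCE B (Python) =====
-- def modFact(n, p):
--     # n! mod p as one running product (A reconstructs it from its prime factorization)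
--     if n >= p:
--         return 0
--     res = 1
--     for i in range(2, n + 1):
--         res = res * i % p
--     return res
-- ===== Notes on version B (the rewrite author's own statement) =====
-- stated objective: simpler
-- what changed: B computes the factorial mod p as a single running product over 2..n instead of A's sieve of Eratosthenes + Legendre-formula exponents + binary modular exponentiation reconstruction from the prime factorization.
-- intended difference: For prime n with 2 <= n < p, A's final loop range(2, n) omits the prime n itself and so returns (n-1)! mod p; B returns n! mod p, the value A's own comment ('n! % p') intends and which A does return for composite n. — e.g. on modFact(2, 5): A returns 1, B returns 2
import Mathlib
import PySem

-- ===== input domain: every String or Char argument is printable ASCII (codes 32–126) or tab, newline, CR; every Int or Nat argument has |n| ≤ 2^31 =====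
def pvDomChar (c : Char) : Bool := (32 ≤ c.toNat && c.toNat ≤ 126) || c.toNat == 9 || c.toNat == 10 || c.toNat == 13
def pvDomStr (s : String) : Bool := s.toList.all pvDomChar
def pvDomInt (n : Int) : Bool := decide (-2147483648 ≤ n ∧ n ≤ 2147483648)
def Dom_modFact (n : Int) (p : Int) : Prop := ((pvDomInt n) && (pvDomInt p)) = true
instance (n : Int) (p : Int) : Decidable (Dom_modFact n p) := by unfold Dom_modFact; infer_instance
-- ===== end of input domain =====

-- B computes n! mod p as one running product; A reconstructs it from the prime
-- factorization of n! (sieve of Eratosthenes + Legendre exponents + binary modular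
-- exponentiation).  On prime n (see D_modFact below) A's `range(2, n)` loses the
-- factor n and B returns the intended n! mod p instead.

-- ===== PORT A =====
-- largestPower: `while (n): n //= p; x += n`.  The loop is ported with a fuel counter
-- (n₀.toNat + 1 steps always suffice at A's call sites, where 0 < n and 2 ≤ p make n
-- strictly decrease to 0); the guard `n ≠ 0` is Python's truthiness test `while (n)`.
def lpLoop : Nat → Int → Int → Int → Int
  | 0, _, _, x => x
  | f + 1, n, p, x =>
    if n ≠ 0 then lpLoop f (PySem.Int.floordiv n p) p (x + PySem.Int.floordiv n p) else x

def largestPower (n : Int) (p : Int) : Int := lpLoop (n.toNat + 1) n p 0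

-- power: binary exponentiation, `while (y > 0)`; fuel y₀.toNat + 1 (y halves each step).
def powLoop : Nat → Int → Int → Int → Int → Int
  | 0, _, _, _, res => res
  | f + 1, x, y, p, res =>
    if 0 < y then
      powLoop f (PySem.Int.mod (x * x) p) (y >>> (1 : Nat)) p
        (if PySem.Int.band y 1 ≠ 0 then PySem.Int.mod (res * x) p else res)
    else res

def power (x : Int) (y : Int) (p : Int) : Int := powLoop (y.toNat + 1) (PySem.Int.mod x p) y p 1

-- inner sieve loop: `for j in range(2*i, n, i): isPrime[j] = 0`
def sieveInner (l : List Int) (i : Int) (n : Int) : List Int :=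
  (PySem.List.pyRange (2 * i) n i).foldl (fun acc j => PySem.List.pySetD acc j 0) l

-- outer sieve loop: `while (i*i <= n): if isPrime[i]: ...; i += 1`; fuel n.toNat + 1
-- (i starts at 2 and increases, and the guard fails once i*i > n).
def sieveLoop : Nat → Int → List Int → Int → List Int
  | 0, _, l, _ => l
  | f + 1, n, l, i =>
    if i * i ≤ n then
      sieveLoop f n (if PySem.List.pyGetD l i 0 ≠ 0 then sieveInner l i n else l) (i + 1)
    else l

def modFact (n : Int) (p : Int) : Int :=
  if n ≥ p then 0
  else
    let isPrime0 : List Int := List.replicate (n + 1).toNat 1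
    let isPrime := sieveLoop (n.toNat + 1) n isPrime0 2
    (PySem.List.pyRange 2 n).foldl
      (fun res i =>
        if PySem.List.pyGetD isPrime i 0 ≠ 0 then
          PySem.Int.mod (res * power i (largestPower n i) p) p
        else res) 1

-- ===== PORT B =====
def modFact_alt (n : Int) (p : Int) : Int :=
  if n ≥ p then 0
  else (PySem.List.pyRange 2 (n + 1)).foldl (fun res i => PySem.Int.mod (res * i) p) 1

-- ===== PRECONDITION & SPEC =====
-- For prime n with 2 ≤ n < p, A's final loop `range(2, n)` omits the prime n itself and
-- so returns (n-1)! mod p; B returns n! mod p, the value A's own comment ("n! % p")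
-- intends and which A does return for composite n.
def D_modFact (n : Int) (p : Int) : Prop := 2 ≤ n ∧ n < p ∧ Nat.Prime n.toNat
instance (n : Int) (p : Int) : Decidable (D_modFact n p) := by unfold D_modFact; infer_instance

def Spec_modFact (n : Int) (p : Int) (out : Int) : Prop := ¬ D_modFact n p → out = modFact_alt n p
instance (n : Int) (p : Int) (out : Int) : Decidable (Spec_modFact n p out) := by
  unfold Spec_modFact; infer_instance

def pvDiffWitness_modFact : Int × Int := (2, 5)
def pvDiffWitnessOut_modFact : Int × Int := (1, 2)

-- ===== CLAIM (what is proved, stated in full; the proofs are below) =====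
def Claim_unchanged_modFact : Prop :=
  ∀ (n : Int) (p : Int), Dom_modFact n p → Spec_modFact n p (modFact n p)
def Claim_changed_modFact : Prop :=
  Dom_modFact (pvDiffWitness_modFact.1) (pvDiffWitness_modFact.2) ∧
  D_modFact (pvDiffWitness_modFact.1) (pvDiffWitness_modFact.2) ∧
  modFact (pvDiffWitness_modFact.1) (pvDiffWitness_modFact.2) = pvDiffWitnessOut_modFact.1 ∧
  modFact_alt (pvDiffWitness_modFact.1) (pvDiffWitness_modFact.2) = pvDiffWitnessOut_modFact.2 ∧
  pvDiffWitnessOut_modFact.1 ≠ pvDiffWitnessOut_modFact.2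

-- ===== LEMMAS AND PROOFS =====

-- modular arithmetic helpers
lemma pv_emod_pow (a n : Int) (k : Nat) : (a % n) ^ k % n = a ^ k % n := by
  induction k with
  | zero => simp
  | succ k ih =>
    rw [pow_succ, pow_succ, Int.mul_emod, ih, Int.emod_emod_of_dvd _ dvd_rfl, ← Int.mul_emod]

lemma pv_mul_emod_left (a c p : Int) : (a % p * c) % p = (a * c) % p := by
  rw [Int.mul_emod, Int.emod_emod_of_dvd _ dvd_rfl, ← Int.mul_emod]

lemma pv_mul_emod_right (a c p : Int) : (a * (c % p)) % p = (a * c) % p := by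
  rw [Int.mul_emod, Int.emod_emod_of_dvd _ dvd_rfl, ← Int.mul_emod]

lemma pv_mul_emod_pow (a b p : Int) (k : Nat) : (a * (b % p) ^ k) % p = (a * b ^ k) % p := by
  rw [Int.mul_emod, pv_emod_pow, ← Int.mul_emod]

-- powLoop computes r · x^y mod p
lemma pv_powLoop_emod (p : Int) (hp : 0 < p) :
    ∀ (f : Nat) (y x r : Int), 0 ≤ y → y.toNat < f →
      powLoop f x y p r % p = (r * x ^ y.toNat) % p := by
  intro f
  induction f with
  | zero => intro y x r hy hf; omega
  | succ f ih =>
    intro y x r hy hf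
    rw [powLoop]
    by_cases h0 : 0 < y
    · rw [if_pos h0]
      have hsh : (y >>> (1 : Nat)) = y / 2 := by
        rcases Int.le.dest hy with ⟨m, rfl⟩
        simp [Int.shiftRight_eq_div_pow]
      have hy2 : 0 ≤ y / 2 := by omega
      have hlt : (y / 2).toNat < f := by omega
      rw [hsh, ih (y / 2) _ _ hy2 hlt]
      rw [PySem.Int.band_one, PySem.Int.mod_eq_emod_of_pos (by norm_num : (0:Int) < 2)]
      set k := (y / 2).toNat with hk
      simp only [PySem.Int.mod_eq_emod_of_pos hp]
      have hxx : x ^ (2 * k) = (x * x) ^ k := by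
        rw [pow_mul, sq]
      by_cases hodd : y % 2 ≠ 0
      · rw [if_pos hodd]
        have hyk : y.toNat = 2 * k + 1 := by omega
        rw [pv_mul_emod_pow, pv_mul_emod_left, hyk]
        congr 1
        rw [pow_succ, ← hxx]; ring
      · rw [if_neg hodd]
        have hyk : y.toNat = 2 * k := by omega
        rw [pv_mul_emod_pow, hyk, hxx]
    · rw [if_neg h0]
      have : y.toNat = 0 := by omega
      simp [this]

lemma pv_power_emod (x y p : Int) (hp : 0 < p) (hy : 0 ≤ y) :
    power x y p % p = x ^ y.toNat % p := by
  unfold power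
  rw [pv_powLoop_emod p hp _ y _ 1 hy (by omega), PySem.Int.mod_eq_emod_of_pos hp,
    one_mul, pv_emod_pow]

-- Legendre's sum, as the Nat mirror of lpLoop
def pvLegendre (a q : Nat) : Nat :=
  if haq : 0 < a ∧ 2 ≤ q then a / q + pvLegendre (a / q) q else 0
termination_by a
decreasing_by exact Nat.div_lt_self haq.1 (by omega)

lemma pv_lpLoop_eq (p : Int) (hp : 2 ≤ p) :
    ∀ (f : Nat) (a x : Int), 0 ≤ a → a.toNat < f →
      lpLoop f a p x = x + (pvLegendre a.toNat p.toNat : Int) := by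
  intro f
  induction f with
  | zero => intro a x ha hf; omega
  | succ f ih =>
    intro a x ha hf
    rw [lpLoop]
    by_cases h0 : a ≠ 0
    · rw [if_pos h0]
      have hap : PySem.Int.floordiv a p = ((a.toNat / p.toNat : Nat) : Int) := by
        conv_lhs => rw [← Int.toNat_of_nonneg ha, ← Int.toNat_of_nonneg (by omega : (0:Int) ≤ p)]
        exact PySem.Int.floordiv_natCast a.toNat p.toNat
      have hdivlt : a.toNat / p.toNat < f := by
        have : a.toNat / p.toNat < a.toNat := Nat.div_lt_self (by omega) (by omega)
        omega
      rw [hap, ih _ _ (by positivity) (by rwa [Int.toNat_natCast])]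
      rw [Int.toNat_natCast]
      conv_rhs => rw [pvLegendre]
      rw [dif_pos ⟨by omega, by omega⟩]
      push_cast
      ring
    · rw [if_neg h0]
      have h0' : a.toNat = 0 := by omega
      rw [h0', pvLegendre, dif_neg (by omega)]
      simp

lemma pv_div_div_pow (a q i : Nat) : a / q / q ^ (1 + i) = a / q ^ (2 + i) := by
  rw [Nat.div_div_eq_div_mul]
  congr 1
  rw [← pow_succ']
  congr 1
  omega

lemma pv_legendre_eq_sum (q : Nat) (hq : 2 ≤ q) :
    ∀ (b a : Nat), a < q ^ b → pvLegendre a q = ∑ i ∈ Finset.Ico 1 b, a / q ^ i := by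
  intro b
  induction b with
  | zero =>
    intro a ha
    rw [pow_zero] at ha
    have : a = 0 := by omega
    subst this
    rw [pvLegendre, dif_neg (by omega)]
    simp
  | succ b ih =>
    intro a ha
    by_cases h0 : 0 < a
    · rw [pvLegendre, dif_pos ⟨h0, hq⟩]
      have hb1 : a / q < q ^ b := by
        rw [Nat.div_lt_iff_lt_mul (by omega)]
        calc a < q ^ (b + 1) := ha
          _ = q ^ b * q := by rw [pow_succ]
      rw [ih _ hb1]
      rcases Nat.eq_zero_or_pos b with hb | hb
      · subst hb
        have haq : a / q = 0 := by
          apply Nat.div_eq_of_lt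
          calc a < q ^ 1 := ha
            _ = q := pow_one q
        rw [haq]
        simp
      · rw [Finset.sum_eq_sum_Ico_succ_bot (by omega : 1 < b + 1)]
        congr 1
        · rw [pow_one]
        · rw [Finset.sum_Ico_eq_sum_range, Finset.sum_Ico_eq_sum_range]
          have hrange : b + 1 - 2 = b - 1 := by omega
          rw [hrange]
          exact Finset.sum_congr rfl (fun i _ => pv_div_div_pow a q i)
    · have h0' : a = 0 := by omega
      subst h0'
      rw [pvLegendre, dif_neg (by omega)]
      symm
      apply Finset.sum_eq_zero
      intro i _
      exact Nat.zero_div _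

lemma pv_legendre_factorization (N q : Nat) (hq : Nat.Prime q) :
    pvLegendre N q = (N.factorial).factorization q := by
  have h2 : 2 ≤ q := hq.two_le
  have hb : N < q ^ (N + 1) := by
    calc N < 2 ^ (N + 1) := by
          have h1 := Nat.lt_two_pow_self (n := N)
          have h2' : (2:Nat) ^ N ≤ 2 ^ (N + 1) := Nat.pow_le_pow_right (by omega) (by omega)
          omega
      _ ≤ q ^ (N + 1) := Nat.pow_le_pow_left h2 _
  rw [pv_legendre_eq_sum q h2 (N + 1) N hb]
  exact (Nat.factorization_factorial hq (Nat.lt_succ_of_le (Nat.log_le_self q N))).symm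

lemma pv_largestPower_eq (N : Nat) (q : Nat) (hq : Nat.Prime q) :
    largestPower (N : Int) (q : Int) = ((N.factorial).factorization q : Int) := by
  unfold largestPower
  rw [pv_lpLoop_eq (q : Int) (by exact_mod_cast hq.two_le) _ _ _ (by positivity) (by simp)]
  simp [pv_legendre_factorization N q hq]

-- folding `pySetD · 0` over a list of nonnegative indices
lemma pv_set_getD (l : List Int) (i m : Nat) (v : Int) (hm : m < l.length) :
    (l.set i v).getD m 0 = if i = m then v else l.getD m 0 := by
  simp [List.getD_eq_getElem?_getD, List.getElem?_set]
  split_ifs <;> simp_all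

lemma pv_foldl_pySetD_length :
    ∀ (js : List Int) (l : List Int),
      (js.foldl (fun acc j => PySem.List.pySetD acc j 0) l).length = l.length := by
  intro js
  induction js with
  | nil => intro l; rfl
  | cons j js ih =>
    intro l
    rw [List.foldl_cons, ih, PySem.List.length_pySetD]

lemma pv_foldl_pySetD_getD :
    ∀ (js : List Int), (∀ j ∈ js, 0 ≤ j) → ∀ (l : List Int) (m : Nat), m < l.length →
      (js.foldl (fun acc j => PySem.List.pySetD acc j 0) l).getD m 0 =
        if ((m : Int) ∈ js) then 0 else l.getD m 0 := by
  intro js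
  induction js with
  | nil => intro _ l m hm; simp
  | cons j js ih =>
    intro hnn l m hm
    rw [List.foldl_cons, PySem.List.pySetD_of_nonneg _ _ (hnn j (by simp))]
    rw [ih (fun x hx => hnn x (by simp [hx])) _ m (by rwa [List.length_set])]
    rw [pv_set_getD _ _ _ _ hm]
    by_cases hj : (m : Int) = j
    · have : j.toNat = m := by omega
      simp [hj, this]
    · have hne : j.toNat ≠ m := by
        have := hnn j (by simp)
        omega
      simp [hne, List.mem_cons, hj]

-- the sieve invariant: m is marked iff some prime q < i has a proper multiple m < N
def pvMarked (N i m : Nat) : Prop :=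
  ∃ q, q < i ∧ Nat.Prime q ∧ q ∣ m ∧ 2 * q ≤ m ∧ m < N

def pvSieveInv (N i : Nat) (l : List Int) : Prop :=
  l.length = N + 1 ∧
  ∀ m, m < N + 1 →
    ((pvMarked N i m ∧ l.getD m 0 = 0) ∨ (¬ pvMarked N i m ∧ l.getD m 0 = 1))

lemma pv_small_prime_divisor (m : Nat) (h2 : 2 ≤ m) (hnp : ¬ Nat.Prime m) :
    m.minFac.Prime ∧ m.minFac ∣ m ∧ 2 * m.minFac ≤ m ∧ m.minFac * m.minFac ≤ m := by
  have hne1 : m ≠ 1 := by omega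
  have hq := Nat.minFac_prime hne1
  have hdvd := Nat.minFac_dvd m
  have hsq : m.minFac * m.minFac ≤ m := by
    have := Nat.minFac_sq_le_self (by omega) hnp
    simpa [pow_two] using this
  refine ⟨hq, hdvd, ?_, hsq⟩
  have : 2 ≤ m.minFac := hq.two_le
  nlinarith

lemma pv_no_proper_divisor_of_prime (m q : Nat) (hm : Nat.Prime m) (hq : Nat.Prime q)
    (hdvd : q ∣ m) (hle : 2 * q ≤ m) : False := by
  rcases (Nat.Prime.eq_one_or_self_of_dvd hm q hdvd) with h | h
  · have := hq.two_le; omega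
  · subst h; have := hm.two_le; omega

lemma pv_marked_self (N i : Nat) (h2 : 2 ≤ i) (hiN : i < N) :
    pvMarked N i i ↔ ¬ Nat.Prime i := by
  constructor
  · rintro ⟨q, hqi, hq, hdvd, hle, _⟩ hp
    exact pv_no_proper_divisor_of_prime i q hp hq hdvd hle
  · intro hnp
    obtain ⟨hq, hdvd, hle, hsq⟩ := pv_small_prime_divisor i h2 hnp
    exact ⟨i.minFac, by nlinarith [hq.two_le], hq, hdvd, hle, hiN⟩

lemma pv_marked_final (N i m : Nat) (h2 : 2 ≤ m) (hmN : m < N) (hbig : N ≤ i * i) :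
    pvMarked N i m ↔ ¬ Nat.Prime m := by
  constructor
  · rintro ⟨q, _, hq, hdvd, hle, _⟩ hp
    exact pv_no_proper_divisor_of_prime m q hp hq hdvd hle
  · intro hnp
    obtain ⟨hq, hdvd, hle, hsq⟩ := pv_small_prime_divisor m h2 hnp
    refine ⟨m.minFac, ?_, hq, hdvd, hle, hmN⟩
    nlinarith [hq.two_le]

lemma pv_mem_sieve_range (i : Int) (hi : 2 ≤ i) (N : Nat) (m : Nat) :
    ((m : Int) ∈ PySem.List.pyRange (2 * i) (N : Int) i) ↔
      (i.toNat ∣ m ∧ 2 * i.toNat ≤ m ∧ m < N) := by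
  rw [PySem.List.mem_pyRange_iff_of_pos (by omega)]
  have hi' : ((i.toNat : Int)) = i := Int.toNat_of_nonneg (by omega)
  constructor
  · rintro ⟨h1, h2, h3⟩
    have hdvd : i ∣ (m : Int) := by
      have h2i : i ∣ (2 * i : Int) := Dvd.intro_left 2 rfl
      have := dvd_add h3 h2i
      simpa using this
    rw [← hi'] at hdvd
    exact ⟨by exact_mod_cast hdvd, by omega, by exact_mod_cast h2⟩
  · rintro ⟨h1, h2, h3⟩
    have hdvd : i ∣ (m : Int) := by
      rw [← hi']
      exact_mod_cast h1
    refine ⟨by omega, by exact_mod_cast h3, ?_⟩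
    exact dvd_sub hdvd (Dvd.intro_left 2 rfl)

lemma pv_marked_succ_of_not_prime (N i m : Nat) (hnp : ¬ Nat.Prime i) :
    pvMarked N (i + 1) m ↔ pvMarked N i m := by
  constructor
  · rintro ⟨q, hqi, hq, hrest⟩
    rcases Nat.lt_succ_iff_lt_or_eq.mp hqi with h | h
    · exact ⟨q, h, hq, hrest⟩
    · subst h; exact absurd hq hnp
  · rintro ⟨q, hqi, hrest⟩
    exact ⟨q, by omega, hrest⟩

lemma pv_sieveInner_inv (N : Nat) (i : Int) (hi : 2 ≤ i) (l : List Int)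
    (hinv : pvSieveInv N i.toNat l) (hprime : Nat.Prime i.toNat) :
    pvSieveInv N (i.toNat + 1) (sieveInner l i (N : Int)) := by
  obtain ⟨hlen, hval⟩ := hinv
  have hnn : ∀ j ∈ PySem.List.pyRange (2 * i) (N : Int) i, 0 ≤ j := by
    intro j hj
    rw [PySem.List.mem_pyRange_iff_of_pos (by omega)] at hj
    omega
  constructor
  · unfold sieveInner
    rw [pv_foldl_pySetD_length, hlen]
  · intro m hm
    unfold sieveInner
    rw [pv_foldl_pySetD_getD _ hnn l m (by omega)]
    by_cases hmem : ((m : Int) ∈ PySem.List.pyRange (2 * i) (N : Int) i)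
    · rw [if_pos hmem]
      rw [pv_mem_sieve_range i hi N m] at hmem
      left
      exact ⟨⟨i.toNat, by omega, hprime, hmem.1, hmem.2.1, hmem.2.2⟩, rfl⟩
    · rw [if_neg hmem]
      rw [pv_mem_sieve_range i hi N m] at hmem
      rcases hval m hm with ⟨hmk, h0⟩ | ⟨hmk, h1⟩
      · left
        refine ⟨?_, h0⟩
        obtain ⟨q, hqi, hrest⟩ := hmk
        exact ⟨q, by omega, hrest⟩
      · right
        refine ⟨?_, h1⟩
        rintro ⟨q, hqi, hq, hdvd, hle, hmN⟩
        rcases Nat.lt_succ_iff_lt_or_eq.mp hqi with h | h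
        · exact hmk ⟨q, h, hq, hdvd, hle, hmN⟩
        · subst h
          exact hmem ⟨hdvd, hle, hmN⟩

lemma pv_sieveLoop_final (N : Nat) :
    ∀ (f : Nat) (i : Int) (l : List Int), 2 ≤ i → ((N : Int) + 1 - i).toNat < f →
      pvSieveInv N i.toNat l →
      ∀ m, 2 ≤ m → m < N →
        (sieveLoop f (N : Int) l i).getD m 0 = if Nat.Prime m then 1 else 0 := by
  intro f
  induction f with
  | zero => intro i l hi hf hinv m hm2 hmN; omega
  | succ f ih =>
    intro i l hi hf hinv m hm2 hmN
    rw [sieveLoop]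
    obtain ⟨hlen, hval⟩ := hinv
    by_cases hguard : i * i ≤ (N : Int)
    · rw [if_pos hguard]
      have h2i : 2 * i ≤ i * i := by nlinarith
      have hiN : i.toNat < N := by omega
      have hfuel : ((N : Int) + 1 - (i + 1)).toNat < f := by omega
      have hilen : i.toNat < l.length := by omega
      have hgetd : PySem.List.pyGetD l i 0 = l.getD i.toNat 0 := by
        conv_lhs => rw [← Int.toNat_of_nonneg (by omega : (0:Int) ≤ i)]
        exact PySem.List.pyGetD_natCast l i.toNat 0
      have htn : (i + 1).toNat = i.toNat + 1 := by omega
      have hself := pv_marked_self N i.toNat (by omega) hiN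
      rcases hval i.toNat (by omega) with ⟨hmk, h0⟩ | ⟨hmk, h1⟩
      · rw [if_neg (by rw [hgetd, h0]; simp)]
        have hnp : ¬ Nat.Prime i.toNat := hself.mp hmk
        refine ih (i + 1) l (by omega) hfuel ⟨hlen, ?_⟩ m hm2 hmN
        intro m' hm'
        rw [htn, pv_marked_succ_of_not_prime N i.toNat m' hnp]
        exact hval m' hm'
      · rw [if_pos (by rw [hgetd, h1]; norm_num)]
        have hp : Nat.Prime i.toNat := by
          by_contra hnp
          exact hmk (hself.mpr hnp)
        have hinv' := pv_sieveInner_inv N i hi l ⟨hlen, hval⟩ hp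
        rw [← htn] at hinv'
        exact ih (i + 1) (sieveInner l i (N : Int)) (by omega) hfuel hinv' m hm2 hmN
    · rw [if_neg hguard]
      have hbig : N ≤ i.toNat * i.toNat := by
        have hi0 : ((i.toNat : Int)) = i := Int.toNat_of_nonneg (by omega)
        have hx : (N : Int) < (i.toNat : Int) * (i.toNat : Int) := by rw [hi0]; omega
        exact_mod_cast hx.le
      have hfin := pv_marked_final N i.toNat m hm2 hmN hbig
      rcases hval m (by omega) with ⟨hmk, h0⟩ | ⟨hmk, h1⟩
      · rw [h0, if_neg (hfin.mp hmk)]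
      · rw [h1, if_pos (by by_contra hnp; exact hmk (hfin.mpr hnp))]

-- A's final loop: the product of the reconstructed prime powers, mod p
lemma pv_A_fold (p : Int) (hp2 : 2 ≤ p) (N : Nat) (L : List Int)
    (hL : ∀ m, 2 ≤ m → m < N → L.getD m 0 = if Nat.Prime m then 1 else 0) :
    ∀ (M : Nat), M ≤ N →
      (PySem.List.pyRange 2 (M : Int)).foldl
        (fun res i =>
          if PySem.List.pyGetD L i 0 ≠ 0 then
            PySem.Int.mod (res * power i (largestPower (N : Int) i) p) p
          else res) 1
      = ((∏ i ∈ Finset.Ico 2 M,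
            (if Nat.Prime i then i ^ ((N.factorial).factorization i) else 1) : Nat) : Int) % p := by
  have hp0 : (0:Int) < p := by omega
  intro M
  induction M with
  | zero =>
    intro _
    rw [PySem.List.pyRange_one_eq_nil (by omega)]
    simp [Int.emod_eq_of_lt (by omega : (0:Int) ≤ 1) (by omega : (1:Int) < p)]
  | succ M ih =>
    intro hMN
    rcases Nat.lt_or_ge M 2 with h2 | h2
    · rw [PySem.List.pyRange_one_eq_nil (show ((M + 1 : Nat) : Int) ≤ 2 by exact_mod_cast (by omega : M + 1 ≤ 2))]
      rw [Finset.Ico_eq_empty (by omega)]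
      simp [Int.emod_eq_of_lt (by omega : (0:Int) ≤ 1) (by omega : (1:Int) < p)]
    · have hcast : ((M + 1 : Nat) : Int) = (M : Int) + 1 := by push_cast; ring
      rw [hcast, PySem.List.pyRange_one_succ_right (by omega), List.foldl_append]
      rw [ih (by omega)]
      simp only [List.foldl_cons, List.foldl_nil]
      have hgetd : PySem.List.pyGetD L (M : Int) 0 = L.getD M 0 :=
        PySem.List.pyGetD_natCast L M 0
      have hLM := hL M h2 (by omega)
      rw [Finset.prod_Ico_succ_top (by omega : 2 ≤ M)]
      by_cases hprime : Nat.Prime M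
      · rw [if_pos (by rw [hgetd, hLM, if_pos hprime]; norm_num)]
        rw [pv_largestPower_eq N M hprime]
        rw [PySem.Int.mod_eq_emod_of_pos hp0, pv_mul_emod_left]
        conv_lhs =>
          rw [← pv_mul_emod_right]
          rw [pv_power_emod _ _ _ hp0 (by positivity)]
          rw [pv_mul_emod_right]
        rw [Int.toNat_natCast, if_pos hprime]
        push_cast
        ring_nf
      · rw [if_neg (by rw [hgetd, hLM, if_neg hprime]; norm_num)]
        rw [if_neg hprime, mul_one]

-- B's loop: the running product, mod p
lemma pv_B_fold (p : Int) (hp2 : 2 ≤ p) :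
    ∀ (M : Nat),
      (PySem.List.pyRange 2 ((M : Int) + 1)).foldl
        (fun res i => PySem.Int.mod (res * i) p) 1
      = ((M.factorial : Nat) : Int) % p := by
  intro M
  induction M with
  | zero =>
    rw [PySem.List.pyRange_one_eq_nil (by omega)]
    simp [Int.emod_eq_of_lt (by omega : (0:Int) ≤ 1) (by omega : (1:Int) < p)]
  | succ M ih =>
    rcases Nat.eq_zero_or_pos M with h | h
    · subst h
      rw [PySem.List.pyRange_one_eq_nil (by omega)]
      simp [Int.emod_eq_of_lt (by omega : (0:Int) ≤ 1) (by omega : (1:Int) < p)]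
    · have hstep : ((M + 1 : Nat) : Int) + 1 = ((M : Int) + 1) + 1 := by push_cast; ring
      rw [hstep, PySem.List.pyRange_one_succ_right (by omega), List.foldl_append]
      rw [ih]
      simp only [List.foldl_cons, List.foldl_nil]
      rw [PySem.Int.mod_eq_emod_of_pos (by omega), pv_mul_emod_left]
      rw [Nat.factorial_succ]
      push_cast
      congr 1
      ring

-- n! is the product of q^(v_q(n!)) over the primes q < n, when n is composite
lemma pv_prod_primes (N : Nat) (h2 : 2 ≤ N) (hnp : ¬ Nat.Prime N) :
    (∏ i ∈ Finset.Ico 2 N,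
      (if Nat.Prime i then i ^ ((N.factorial).factorization i) else 1)) = N.factorial := by
  rw [← Finset.prod_filter]
  have hfac : N.factorial ≠ 0 := Nat.factorial_ne_zero N
  conv_rhs => rw [← Nat.prod_factorization_pow_eq_self hfac]
  rw [Nat.prod_factorization_eq_prod_primeFactors]
  symm
  apply Finset.prod_subset
  · intro q hq
    have hqp : Nat.Prime q := Nat.prime_of_mem_primeFactors hq
    have hqd : q ∣ N.factorial := Nat.dvd_of_mem_primeFactors hq
    have hqN : q ≤ N := (Nat.Prime.dvd_factorial hqp).mp hqd
    have hqlt : q < N := lt_of_le_of_ne hqN (by rintro rfl; exact hnp hqp)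
    simp [Finset.mem_filter, Finset.mem_Ico, hqp, hqp.two_le, hqlt]
  · intro q hq hnq
    have hqp : Nat.Prime q := (Finset.mem_filter.mp hq).2
    have hz : (N.factorial).factorization q = 0 := by
      by_contra hne
      apply hnq
      rw [Nat.mem_primeFactors]
      exact ⟨hqp, Nat.dvd_of_factorization_pos hne, hfac⟩
    rw [hz, pow_zero]

-- ===== VERDICT (by name: the statement is the Claim_ definition above) =====
theorem modFact_spec : Claim_unchanged_modFact := by
  unfold Claim_unchanged_modFact Spec_modFact
  intro n p _ hND
  by_cases hge : n ≥ p
  · simp only [modFact, modFact_alt, if_pos hge]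
  · by_cases hn1 : n ≤ 1
    · simp only [modFact, modFact_alt, if_neg hge]
      rw [PySem.List.pyRange_one_eq_nil (by omega : n ≤ 2),
        PySem.List.pyRange_one_eq_nil (by omega : n + 1 ≤ 2)]
      rfl
    · have hlt : n < p := by omega
      have hn2 : 2 ≤ n := by omega
      have hNP : ¬ Nat.Prime n.toNat := fun hp => hND ⟨hn2, hlt, hp⟩
      have hp2 : 2 ≤ p := by omega
      set N := n.toNat with hN
      have hnN : n = (N : Int) := (Int.toNat_of_nonneg (by omega)).symm
      have hN2 : 2 ≤ N := by omega
      simp only [modFact, modFact_alt, if_neg hge]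
      rw [hnN]
      have ht1 : ((N : Int) + 1).toNat = N + 1 := by omega
      have ht2 : ((N : Int)).toNat = N := by omega
      rw [ht1, ht2]
      have hinit : pvSieveInv N 2 (List.replicate (N + 1) (1 : Int)) := by
        constructor
        · simp
        · intro m hm
          right
          constructor
          · rintro ⟨q, hq2, hqp, _⟩
            have := hqp.two_le
            omega
          · rw [List.getD_eq_getElem?_getD, List.getElem?_replicate, if_pos hm]
            rfl
      have hLc : ∀ m, 2 ≤ m → m < N →
          (sieveLoop (N + 1) (N : Int) (List.replicate (N + 1) 1) 2).getD m 0
            = if Nat.Prime m then 1 else 0 := by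
        intro m hm2 hmN
        exact pv_sieveLoop_final N (N + 1) 2 _ (by omega) (by omega) hinit m hm2 hmN
      rw [pv_A_fold p hp2 N _ hLc N le_rfl, pv_prod_primes N hN2 hNP, pv_B_fold p hp2 N]

theorem modFact_changed : Claim_changed_modFact := by
  unfold Claim_changed_modFact
  refine ⟨by decide, by decide, by decide, by decide, by decide⟩
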